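-- pv_equiv track=rewrite | github.com/pKostantine/pKosta | ICS3UEmiliaNumbers.py | isEmilia
-- ===== SOURCE A (Python) =====
-- def isEmilia(number):
--     factorList = []
--     # Create a list of factors of the number
--     for i in range(1, number + 1):
--         if number % i == 0:
--             factorList.append(i)
--             # Iterate over the list of factors, comparing the sum of one pair with the difference of another pair
--     for x in factorList:
--         for y in factorList:
--             if x + y == (number//x) - (number//y):
--                 return True
--     return False
-- ===== SOURCE B (Python) =====
-- def isEmilia(number):
--     # Collect all divisors by trial division only up to sqrt(number),
--     # adding both i and number // i; then run the same pair check.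
--     divs = set()
--     i = 1
--     while i * i <= number:
--         if number % i == 0:
--             divs.add(i)
--             divs.add(number // i)
--         i += 1
--     return any(x + y == number // x - number // y for x in divs for y in divs)
-- ===== Notes on version B (the rewrite author's own statement) =====
-- stated objective: faster
-- what changed: B collects divisors by trial division only up to sqrt(number) (adding both i and number//i to a set) instead of scanning all numbers 1..number, then runs the same pair check.
import Mathlib
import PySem

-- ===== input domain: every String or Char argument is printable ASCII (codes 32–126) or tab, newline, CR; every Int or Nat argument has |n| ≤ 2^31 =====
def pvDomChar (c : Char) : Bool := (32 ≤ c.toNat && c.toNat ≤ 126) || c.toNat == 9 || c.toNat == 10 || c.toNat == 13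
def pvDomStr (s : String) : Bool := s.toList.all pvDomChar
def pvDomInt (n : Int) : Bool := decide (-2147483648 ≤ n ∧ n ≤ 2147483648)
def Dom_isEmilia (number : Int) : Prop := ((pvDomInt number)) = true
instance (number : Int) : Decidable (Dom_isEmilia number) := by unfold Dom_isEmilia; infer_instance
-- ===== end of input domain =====

-- B replaces A's full 1..n divisor scan by trial division up to sqrt(n); same pair check afterwards.

-- ===== PORT A =====
def isEmilia (number : Int) : Bool :=
  let factorList := (PySem.List.pyRange 1 (number + 1) 1).foldl
      (fun acc i => if PySem.Int.mod number i == 0 then acc ++ [i] else acc) []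
  factorList.any fun x => factorList.any fun y =>
    x + y == PySem.Int.floordiv number x - PySem.Int.floordiv number y

-- ===== PORT B =====
-- the while loop 'while i*i <= number: …; i += 1' of Source B (i is always ≥ 1 there; Nat counter)
def altCollect (number : Int) (i : Nat) (s : PySem.Set Int) : PySem.Set Int :=
  if h : (i : Int) * i ≤ number then
    altCollect number (i + 1)
      (if PySem.Int.mod number i == 0 then
        PySem.Set.add (PySem.Set.add s i) (PySem.Int.floordiv number i)
      else s)
  else s
termination_by (number + 1 - i).toNat
decreasing_by
  rcases Nat.eq_zero_or_pos i with rfl | h1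
  · simp only [Nat.cast_zero, mul_zero] at h
    omega
  · have h2 : (i : Int) ≤ (i : Int) * i := by
      nlinarith [(by exact_mod_cast h1 : (1 : Int) ≤ (i : Int))]
    omega

def isEmilia_alt (number : Int) : Bool :=
  let divs := altCollect number 1 PySem.Set.empty
  divs.any fun x => divs.any fun y =>
    x + y == PySem.Int.floordiv number x - PySem.Int.floordiv number y

-- ===== PRECONDITION & SPEC =====
def Spec_isEmilia (number : Int) (out : Bool) : Prop := out = isEmilia_alt number
instance (number : Int) (out : Bool) : Decidable (Spec_isEmilia number out) := by unfold Spec_isEmilia; infer_instance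

-- ===== CLAIM (what is proved, stated in full; the proofs are below) =====
def Claim_equal_isEmilia : Prop := ∀ (number : Int), Dom_isEmilia number → Spec_isEmilia number (isEmilia number)

-- ===== LEMMAS AND PROOFS =====

-- elements reachable by the sqrt-loop from state (i, s)
lemma mem_altCollect (number : Int) (i : Nat) (s : PySem.Set Int) (x : Int) :
    x ∈ altCollect number i s ↔
      x ∈ s ∨ ∃ j : Nat, i ≤ j ∧ (j : Int) * j ≤ number ∧ (j : Int) ∣ number ∧
        (x = j ∨ x = PySem.Int.floordiv number j) := by
  fun_induction altCollect number i s with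
  | case1 i s h ih =>
    rw [dite_eq_ite] at ih
    rw [ih]
    constructor
    · rintro (hs | ⟨j, hj, hj2, hjd, hx⟩)
      · split_ifs at hs with hm
        · have hdvd : (i : Int) ∣ number :=
            (PySem.Int.mod_eq_zero_iff_dvd number i).mp (by simpa using hm)
          simp only [PySem.Set.mem_add] at hs
          rcases hs with (hs | hs) | hs
          · exact Or.inl hs
          · exact Or.inr ⟨i, le_refl _, h, hdvd, Or.inl hs⟩
          · exact Or.inr ⟨i, le_refl _, h, hdvd, Or.inr hs⟩
        · exact Or.inl hs
      · exact Or.inr ⟨j, Nat.le_of_succ_le hj, hj2, hjd, hx⟩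
    · rintro (hs | ⟨j, hj, hj2, hjd, hx⟩)
      · left; split_ifs with hm
        · simp only [PySem.Set.mem_add]; exact Or.inl (Or.inl hs)
        · exact hs
      · obtain rfl | hlt := Nat.eq_or_lt_of_le hj
        · left
          have hm : (PySem.Int.mod number i == 0) = true := by
            simpa using (PySem.Int.mod_eq_zero_iff_dvd number i).mpr hjd
          rw [if_pos hm]
          simp only [PySem.Set.mem_add]
          rcases hx with hx | hx
          · exact Or.inl (Or.inr hx)
          · exact Or.inr hx
        · exact Or.inr ⟨j, hlt, hj2, hjd, hx⟩
  | case2 i s h =>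
    constructor
    · exact Or.inl
    · rintro (hs | ⟨j, hj, hj2, hjd, _⟩)
      · exact hs
      · exact absurd (le_trans (by exact_mod_cast Nat.mul_le_mul hj hj) hj2) h

-- a positive divisor of number ≥ 1 is exactly a member of a sqrt-bounded pair {j, number//j}
lemma divisor_iff (number : Int) (hn : 1 ≤ number) (x : Int) :
    (∃ j : Nat, 1 ≤ j ∧ (j : Int) * j ≤ number ∧ (j : Int) ∣ number ∧
        (x = j ∨ x = PySem.Int.floordiv number j)) ↔ (1 ≤ x ∧ x ∣ number) := by
  constructor
  · rintro ⟨j, hj1, hj2, hjd, hx⟩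
    have hjpos : (0 : Int) < j := by exact_mod_cast hj1
    obtain ⟨c, hc⟩ := hjd
    have hcpos : (0 : Int) < c := by nlinarith
    have hfd : PySem.Int.floordiv number (j : Int) = c := by
      rw [PySem.Int.floordiv_eq_ediv_of_pos hjpos, hc, Int.mul_ediv_cancel_left _ (by omega)]
    rcases hx with rfl | rfl
    · exact ⟨by exact_mod_cast hj1, ⟨c, hc⟩⟩
    · rw [hfd]; exact ⟨hcpos, ⟨(j : Int), by linarith [hc]⟩⟩
  · rintro ⟨hx1, hxd⟩
    obtain ⟨c, hc⟩ := hxd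
    have hcpos : (0 : Int) < c := by nlinarith
    by_cases hs : x * x ≤ number
    · have hxt : (x.toNat : Int) = x := Int.toNat_of_nonneg (by omega)
      refine ⟨x.toNat, by omega, by rw [hxt]; exact hs, by rw [hxt]; exact ⟨c, hc⟩,
        Or.inl hxt.symm⟩
    · have hcx : c < x := by nlinarith
      have hct : (c.toNat : Int) = c := Int.toNat_of_nonneg (by omega)
      refine ⟨c.toNat, by omega, by rw [hct]; nlinarith, by rw [hct]; exact ⟨x, by linarith [hc]⟩,
        Or.inr ?_⟩
      rw [hct, PySem.Int.floordiv_eq_ediv_of_pos hcpos,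
        show number = c * x by linarith [hc], Int.mul_ediv_cancel_left _ (by omega)]

-- membership in A's factor list
lemma mem_factorList (number : Int) (x : Int) :
    x ∈ (PySem.List.pyRange 1 (number + 1) 1).foldl
        (fun acc i => if PySem.Int.mod number i == 0 then acc ++ [i] else acc) [] ↔
      (1 ≤ x ∧ x ≤ number ∧ x ∣ number) := by
  rw [PySem.List.foldl_append_if_eq_filter]
  simp only [List.nil_append, List.mem_filter, PySem.List.mem_pyRange_one,
    beq_iff_eq, PySem.Int.mod_eq_zero_iff_dvd]
  constructor
  · rintro ⟨⟨h1, h2⟩, h3⟩; exact ⟨h1, by omega, h3⟩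
  · rintro ⟨h1, h2, h3⟩; exact ⟨⟨h1, by omega⟩, h3⟩

-- a double-any over a list only depends on the list's members
lemma any_any_congr (l1 l2 : List Int) (h : ∀ x, x ∈ l1 ↔ x ∈ l2)
    (g : Int → Int → Bool) :
    (l1.any fun x => l1.any fun y => g x y) = (l2.any fun x => l2.any fun y => g x y) := by
  rw [Bool.eq_iff_iff]
  simp only [List.any_eq_true]
  constructor
  · rintro ⟨x, hx, y, hy, hg⟩; exact ⟨x, (h x).mp hx, y, (h y).mp hy, hg⟩
  · rintro ⟨x, hx, y, hy, hg⟩; exact ⟨x, (h x).mpr hx, y, (h y).mpr hy, hg⟩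

-- ===== VERDICT (by name: the statement is the Claim_ definition above) =====
theorem isEmilia_spec : Claim_equal_isEmilia := by
  intro number _
  show isEmilia number = isEmilia_alt number
  by_cases hn : 1 ≤ number
  · simp only [isEmilia, isEmilia_alt]
    apply any_any_congr
    intro x
    rw [mem_factorList, mem_altCollect]
    simp only [PySem.Set.empty, List.not_mem_nil, false_or]
    rw [divisor_iff number hn x]
    constructor
    · rintro ⟨h1, _, h3⟩; exact ⟨h1, h3⟩
    · rintro ⟨h1, h3⟩; exact ⟨h1, Int.le_of_dvd (by omega) h3, h3⟩
  · simp only [isEmilia, isEmilia_alt]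
    rw [PySem.List.pyRange_one_eq_nil (by omega), altCollect]
    rw [dif_neg (by push_cast; omega)]
    rfl
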